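-- pv_equiv track=rewrite | github.com/NazaGara/betoNER | utils.py | correct_padding
-- ===== SOURCE A (Python) =====
-- def correct_padding(word_ids: list, labels: list, preds: list) -> list:
--     new_labels, new_preds = [], []
--     for i in range(len(word_ids)):
--         lab, pred = [], []
--         label_list, pred_list = labels[i], preds[i]
--         prev_idx = None
--         for j, word_idx in enumerate(word_ids[i]):
--             if word_idx == None:
--                 pass  # no agrego el [CLS] ni [SEP] ni cualquier otro que no correponda.
--             elif word_idx == prev_idx:
--                 pass  # no tengo que agregar nada, sigue siendo la misma palabra.
--             else:
--                 lab.append(label_list[j])  # lab.append(TOKEN_MAP[label_list[j]])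
--                 pred.append(pred_list[j])
--             prev_idx = word_idx
--         new_labels.append(lab)
--         new_preds.append(pred)
--
--     return new_labels, new_preds
-- ===== SOURCE B (Python) =====
-- def correct_padding(word_ids: list, labels: list, preds: list) -> list:
--     # Run-length traversal: advance an index over each row by whole maximal runs
--     # of equal consecutive word ids; a run contributes its first position's
--     # label/pred, unless its id is None.
--     new_labels, new_preds = [], []
--     for ids, lab_row, pred_row in zip(word_ids, labels, preds):
--         lab, pred = [], []
--         n = len(ids)
--         j = 0
--         while j < n:
--             w = ids[j]
--             if w is not None:
--                 lab.append(lab_row[j])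
--                 pred.append(pred_row[j])
--             k = j + 1
--             while k < n and ids[k] == w:
--                 k += 1
--             j = k
--         new_labels.append(lab)
--         new_preds.append(pred)
--     return new_labels, new_preds
-- ===== Notes on version B (the rewrite author's own statement) =====
-- stated objective: alternative
-- what changed: Replaces A's per-token prev_idx state machine by a run-length traversal: an index jumps over each maximal run of equal consecutive word ids (inner scan finds the run end), emitting the run's first label/pred unless the id is None; the outer loop zips the three lists instead of indexing by i.
-- outside the precondition, e.g. on correct_padding([[0]], [], []): A raises IndexError, B returns ([], []); on correct_padding([[0, 1]], [[5]], [[6]]): A raises IndexError, B raises IndexError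
import Mathlib
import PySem

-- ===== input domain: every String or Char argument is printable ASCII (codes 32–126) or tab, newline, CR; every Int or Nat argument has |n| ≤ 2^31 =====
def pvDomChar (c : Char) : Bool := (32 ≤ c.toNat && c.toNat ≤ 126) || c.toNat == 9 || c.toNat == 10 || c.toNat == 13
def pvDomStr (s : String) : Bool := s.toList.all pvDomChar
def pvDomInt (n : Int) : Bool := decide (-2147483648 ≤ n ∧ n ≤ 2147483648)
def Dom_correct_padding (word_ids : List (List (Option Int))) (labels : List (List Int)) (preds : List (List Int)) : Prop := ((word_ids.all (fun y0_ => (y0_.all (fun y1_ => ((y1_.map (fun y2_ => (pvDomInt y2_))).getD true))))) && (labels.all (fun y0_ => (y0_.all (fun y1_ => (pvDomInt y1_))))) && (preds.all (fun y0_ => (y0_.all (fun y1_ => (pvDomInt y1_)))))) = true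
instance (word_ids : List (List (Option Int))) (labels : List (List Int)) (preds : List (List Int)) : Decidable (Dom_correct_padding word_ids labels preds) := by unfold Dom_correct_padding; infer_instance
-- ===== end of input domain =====

-- B replaces A's per-token prev_idx state machine by a run-length traversal: the row
-- index jumps over each maximal run of equal consecutive word ids, emitting the run's
-- first label/pred unless its id is None; objective: alternative (same cost).

-- ===== PORT A =====
-- the body of A's inner loop: state (lab, pred, prev_idx), one enumerate step (j, word_idx)
def pvStepA (label_list pred_list : List Int) (st : List Int × List Int × Option Int)
    (p : Int × Option Int) : List Int × List Int × Option Int :=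
  match p.2 with
  | none => (st.1, st.2.1, none)                                   -- word_idx == None: pass; prev_idx = word_idx
  | some v =>
    if some v == st.2.2 then (st.1, st.2.1, some v)                -- word_idx == prev_idx: pass
    else (st.1 ++ [(PySem.List.pyGet? label_list p.1).getD 0],
          st.2.1 ++ [(PySem.List.pyGet? pred_list p.1).getD 0], some v)       -- append (in range by Pre_)

-- A's loop body for one batch row i (state machine over enumerate(word_ids[i]))
def pvRowA (ids : List (Option Int)) (label_list pred_list : List Int) : List Int × List Int :=
  let st := (PySem.List.enumerate ids 0).foldl (pvStepA label_list pred_list) ([], [], none)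
  (st.1, st.2.1)

def correct_padding (word_ids : List (List (Option Int))) (labels : List (List Int)) (preds : List (List Int)) : List (List Int) × List (List Int) :=
  (PySem.List.pyRange 0 word_ids.length 1).foldl
    (fun (acc : List (List Int) × List (List Int)) i =>
      -- word_ids[i]; labels[i], preds[i] (in range by Pre_)
      let row := pvRowA ((PySem.List.pyGet? word_ids i).getD [])
        ((PySem.List.pyGet? labels i).getD []) ((PySem.List.pyGet? preds i).getD [])
      (acc.1 ++ [row.1], acc.2 ++ [row.2]))
    ([], [])

-- ===== PORT B =====
-- inner while: `k = j+1; while k < n and ids[k] == w: k += 1` (ids[k] in range by the guard)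
def pvRunEnd (ids : List (Option Int)) (w : Option Int) (k : Nat) : Nat :=
  if _h : k < ids.length ∧ ids.getD k none = w then pvRunEnd ids w (k + 1) else k
termination_by ids.length - k
decreasing_by omega

-- termination fact for the outer while (cited by pvRowWhileB's decreasing_by)
lemma pvRunEnd_ge (ids : List (Option Int)) (w : Option Int) : ∀ k, k ≤ pvRunEnd ids w k := by
  intro k
  induction k using pvRunEnd.induct ids w with
  | case1 k h ih => rw [pvRunEnd, dif_pos h]; omega
  | case2 k h => rw [pvRunEnd, dif_neg h]

-- outer while over one row: `while j < n: w = ids[j]; append if w is not None; j = run end`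
def pvRowWhileB (ids : List (Option Int)) (lab_row pred_row : List Int) (j : Nat)
    (lab pred : List Int) : List Int × List Int :=
  if h : j < ids.length then
    pvRowWhileB ids lab_row pred_row (pvRunEnd ids (ids.getD j none) (j + 1))
      (if ids.getD j none ≠ none then lab ++ [(PySem.List.pyGet? lab_row (j : Int)).getD 0] else lab)
      (if ids.getD j none ≠ none then pred ++ [(PySem.List.pyGet? pred_row (j : Int)).getD 0] else pred)
  else (lab, pred)
termination_by ids.length - j
decreasing_by have := pvRunEnd_ge ids (ids.getD j none) (j + 1); omega

def correct_padding_alt (word_ids : List (List (Option Int))) (labels : List (List Int)) (preds : List (List Int)) : List (List Int) × List (List Int) :=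
  (word_ids.zip (labels.zip preds)).foldl
    (fun (acc : List (List Int) × List (List Int)) t =>
      let row := pvRowWhileB t.1 t.2.1 t.2.2 0 [] []
      (acc.1 ++ [row.1], acc.2 ++ [row.2]))
    ([], [])

-- ===== PRECONDITION & SPEC =====
-- Pre_ excludes exactly the inputs where Python A raises IndexError: labels/preds shorter than
-- word_ids, or a kept position j (first subtoken of a word) out of range of labels[i]/preds[i].
def Pre_correct_padding (word_ids : List (List (Option Int))) (labels : List (List Int)) (preds : List (List Int)) : Prop :=
  word_ids.length ≤ labels.length ∧ word_ids.length ≤ preds.length ∧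
  ∀ i, i < word_ids.length →
    ∀ j, j < (word_ids.getD i []).length →
      ((word_ids.getD i []).getD j none ≠ none ∧
        (j = 0 ∨ (word_ids.getD i []).getD (j - 1) none ≠ (word_ids.getD i []).getD j none)) →
      j < (labels.getD i []).length ∧ j < (preds.getD i []).length
instance (word_ids : List (List (Option Int))) (labels : List (List Int)) (preds : List (List Int)) : Decidable (Pre_correct_padding word_ids labels preds) := by unfold Pre_correct_padding; infer_instance

def pvWitness_correct_padding : List (List (Option Int)) × List (List Int) × List (List Int) :=
  ([[some 0, some 0, none, some 1]], [[1, 2, 3, 4]], [[5, 6, 7, 8]])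

def Spec_correct_padding (word_ids : List (List (Option Int))) (labels : List (List Int)) (preds : List (List Int)) (out : List (List Int) × List (List Int)) : Prop := out = correct_padding_alt word_ids labels preds
instance (word_ids : List (List (Option Int))) (labels : List (List Int)) (preds : List (List Int)) (out : List (List Int) × List (List Int)) : Decidable (Spec_correct_padding word_ids labels preds out) := by unfold Spec_correct_padding; infer_instance

-- ===== CLAIM (what is proved, stated in full; the proofs are below) =====
def Claim_equal_correct_padding : Prop := ∀ (word_ids : List (List (Option Int))) (labels : List (List Int)) (preds : List (List Int)), Dom_correct_padding word_ids labels preds → Pre_correct_padding word_ids labels preds → Spec_correct_padding word_ids labels preds (correct_padding word_ids labels preds)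

-- ===== LEMMAS AND PROOFS =====

-- reference form of A's inner loop, building its two lists front-to-back
def pvRowRec (ls ps : List Int) : Option Int → List (Int × Option Int) → List Int × List Int
  | _, [] => ([], [])
  | prev, (j, wi) :: rest =>
    match wi with
    | none => pvRowRec ls ps none rest
    | some v =>
      if some v == prev then pvRowRec ls ps (some v) rest
      else
        let t := pvRowRec ls ps (some v) rest
        ((PySem.List.pyGet? ls j).getD 0 :: t.1, (PySem.List.pyGet? ps j).getD 0 :: t.2)

lemma foldl_stepA (ls ps : List Int) :
    ∀ (l : List (Int × Option Int)) (lab pred : List Int) (prev : Option Int),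
      (l.foldl (pvStepA ls ps) (lab, pred, prev)).1 = lab ++ (pvRowRec ls ps prev l).1 ∧
      (l.foldl (pvStepA ls ps) (lab, pred, prev)).2.1 = pred ++ (pvRowRec ls ps prev l).2 := by
  intro l
  induction l with
  | nil => intro lab pred prev; simp [pvRowRec]
  | cons p rest ih =>
    intro lab pred prev
    obtain ⟨j, wi⟩ := p
    cases wi with
    | none => simpa [pvRowRec, pvStepA] using ih lab pred none
    | some v =>
      by_cases h : (some v == prev) = true
      · simpa [pvRowRec, pvStepA, h] using ih lab pred (some v)
      · have h' : (some v == prev) = false := by simp at h; simp [h]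
        have := ih (lab ++ [(PySem.List.pyGet? ls j).getD 0]) (pred ++ [(PySem.List.pyGet? ps j).getD 0]) (some v)
        simp [pvRowRec, pvStepA, h'] at this ⊢
        exact this

-- properties of the inner while's exit index
lemma pvRunEnd_le (ids : List (Option Int)) (w : Option Int) :
    ∀ k, k ≤ ids.length → pvRunEnd ids w k ≤ ids.length := by
  intro k
  induction k using pvRunEnd.induct ids w with
  | case1 k h ih =>
    intro _
    have heq : pvRunEnd ids w k = pvRunEnd ids w (k + 1) := by rw [pvRunEnd, dif_pos h]
    rw [heq]; exact ih (by omega)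
  | case2 k h =>
    intro hk
    have heq : pvRunEnd ids w k = k := by rw [pvRunEnd, dif_neg h]
    omega

lemma pvRunEnd_spec (ids : List (Option Int)) (w : Option Int) :
    ∀ k, (∀ m, k ≤ m → m < pvRunEnd ids w k → ids.getD m none = w) ∧
      (ids.length ≤ pvRunEnd ids w k ∨
        (pvRunEnd ids w k < ids.length ∧ ids.getD (pvRunEnd ids w k) none ≠ w)) := by
  intro k
  induction k using pvRunEnd.induct ids w with
  | case1 k h ih =>
    have heq : pvRunEnd ids w k = pvRunEnd ids w (k + 1) := by rw [pvRunEnd, dif_pos h]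
    rw [heq]
    refine ⟨?_, ih.2⟩
    intro m hm1 hm2
    rcases Nat.eq_or_lt_of_le hm1 with rfl | hlt
    · exact h.2
    · exact ih.1 m hlt hm2
  | case2 k h =>
    have heq : pvRunEnd ids w k = k := by rw [pvRunEnd, dif_neg h]
    rw [heq]
    refine ⟨by omega, ?_⟩
    by_cases hk : k < ids.length
    · right; exact ⟨hk, fun he => h ⟨hk, he⟩⟩
    · left; omega

-- pvRowRec skips a whole run of equal ids (all equal to prev)
lemma rowRec_skip_run (ls ps : List Int) (ids : List (Option Int)) (w : Option Int) :
    ∀ d j k, k - j ≤ d → j ≤ k → k ≤ ids.length →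
      (∀ m, j ≤ m → m < k → ids.getD m none = w) →
      pvRowRec ls ps w (PySem.List.enumerate (ids.drop j) (j : Int)) =
      pvRowRec ls ps w (PySem.List.enumerate (ids.drop k) (k : Int)) := by
  intro d
  induction d with
  | zero =>
    intro j k h1 h2 _ _
    have : j = k := by omega
    subst this; rfl
  | succ d ih =>
    intro j k h1 h2 h3 hrun
    rcases Nat.eq_or_lt_of_le h2 with rfl | hlt
    · rfl
    · have hj : j < ids.length := by omega
      have hdrop : ids.drop j = ids.getD j none :: ids.drop (j + 1) := by
        rw [List.getD_eq_getElem ids none hj]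
        exact (List.getElem_cons_drop hj).symm
      have hw : ids.getD j none = w := hrun j le_rfl hlt
      have hrest := ih (j + 1) k (by omega) (by omega) h3 (fun m hm1 hm2 => hrun m (by omega) hm2)
      rw [hdrop, hw, PySem.List.enumerate_cons]
      have hcast : (j : Int) + 1 = ((j + 1 : Nat) : Int) := by push_cast; ring
      rw [hcast]
      cases w with
      | none => simpa [pvRowRec] using hrest
      | some v => simpa [pvRowRec] using hrest

-- the outer while loop at a run start equals A's state machine over the suffix
lemma rowWhile_eq_rowRec (ids : List (Option Int)) (ls ps : List Int) :
    ∀ d j (prev : Option Int) (lab pred : List Int), ids.length - j ≤ d →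
      (∀ v, ids.getD j none = some v → prev ≠ some v) →
      pvRowWhileB ids ls ps j lab pred =
        (lab ++ (pvRowRec ls ps prev (PySem.List.enumerate (ids.drop j) (j : Int))).1,
         pred ++ (pvRowRec ls ps prev (PySem.List.enumerate (ids.drop j) (j : Int))).2) := by
  intro d
  induction d with
  | zero =>
    intro j prev lab pred h1 _
    have hj : ¬ j < ids.length := by omega
    rw [pvRowWhileB, dif_neg hj, List.drop_eq_nil_of_le (by omega)]
    simp [pvRowRec, PySem.List.enumerate_nil]
  | succ d ih =>
    intro j prev lab pred h1 hprev
    by_cases hj : j < ids.length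
    · have hge := pvRunEnd_ge ids (ids.getD j none) (j + 1)
      have hele := pvRunEnd_le ids (ids.getD j none) (j + 1) (by omega)
      have hspec := pvRunEnd_spec ids (ids.getD j none) (j + 1)
      have hdrop : ids.drop j = ids.getD j none :: ids.drop (j + 1) := by
        rw [List.getD_eq_getElem ids none hj]
        exact (List.getElem_cons_drop hj).symm
      have hskip := rowRec_skip_run ls ps ids (ids.getD j none)
        (pvRunEnd ids (ids.getD j none) (j + 1) - (j + 1)) (j + 1)
        (pvRunEnd ids (ids.getD j none) (j + 1)) le_rfl hge hele
        (fun m hm1 hm2 => hspec.1 m hm1 hm2)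
      have hnext : ∀ v, ids.getD (pvRunEnd ids (ids.getD j none) (j + 1)) none = some v →
          ids.getD j none ≠ some v := by
        intro v hv hwv
        rcases hspec.2 with h | h
        · rw [List.getD_eq_default ids none (by omega)] at hv; simp at hv
        · exact h.2 (by rw [hv, hwv])
      have hcast : (j : Int) + 1 = ((j + 1 : Nat) : Int) := by push_cast; ring
      rw [pvRowWhileB, dif_pos hj, hdrop, PySem.List.enumerate_cons, hcast]
      cases hwc : ids.getD j none with
      | none =>
        rw [hwc] at hskip hnext hge hele
        have hih := ih (pvRunEnd ids none (j + 1)) none lab pred (by omega)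
          (fun v hv => by simp)
        rw [if_neg (by simp), if_neg (by simp)]
        simp only [pvRowRec]
        rw [hskip]
        exact hih
      | some v =>
        rw [hwc] at hskip hnext hge hele
        have hih := ih (pvRunEnd ids (some v) (j + 1)) (some v)
          (lab ++ [(PySem.List.pyGet? ls (j : Int)).getD 0])
          (pred ++ [(PySem.List.pyGet? ps (j : Int)).getD 0]) (by omega)
          (fun u hu => hnext u hu)
        have hne : (some v == prev) = false := by
          have := hprev v hwc
          simp; exact fun h => this h.symm
        rw [if_pos (by simp), if_pos (by simp)]
        simp only [pvRowRec, hne, Bool.false_eq_true, if_false]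
        rw [hskip]
        simpa [List.append_assoc] using hih
    · rw [pvRowWhileB, dif_neg hj, List.drop_eq_nil_of_le (by omega)]
      simp [pvRowRec, PySem.List.enumerate_nil]

-- per-row: B's run-jumping while loop equals A's inner fold
lemma rowB_eq_rowA (ids : List (Option Int)) (ls ps : List Int) :
    pvRowWhileB ids ls ps 0 [] [] = pvRowA ids ls ps := by
  have h1 := foldl_stepA ls ps (PySem.List.enumerate ids 0) [] [] none
  have h2 := rowWhile_eq_rowRec ids ls ps ids.length 0 none [] [] (by omega)
    (fun v _ => by simp)
  unfold pvRowA
  rw [h2]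
  simp only [List.drop_zero, Nat.cast_zero, List.nil_append]
  exact Prod.ext (by rw [h1.1]; simp) (by rw [h1.2]; simp)

-- both outer loops just append one element per iteration: turn them into maps
lemma foldl_pair_append {α : Type} (f g : α → List Int) :
    ∀ (l : List α) (a b : List (List Int)),
      (l.foldl (fun acc x => (acc.1 ++ [f x], acc.2 ++ [g x])) (a, b)) =
        (a ++ l.map f, b ++ l.map g) := by
  intro l
  induction l with
  | nil => simp
  | cons x xs ih => intro a b; simp [ih (a ++ [f x]) (b ++ [g x])]

-- indexing over range(len(word_ids)) equals zipping the three lists, under the length bounds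
lemma map_range3 {γ : Type} :
    ∀ (wids : List (List (Option Int))) (ls ps : List (List Int))
      (F : List (Option Int) → List Int → List Int → γ),
      wids.length ≤ ls.length → wids.length ≤ ps.length →
      (List.range wids.length).map
        (fun i => F ((wids[i]?).getD []) ((ls[i]?).getD []) ((ps[i]?).getD [])) =
      (wids.zip (ls.zip ps)).map (fun t => F t.1 t.2.1 t.2.2) := by
  intro wids
  induction wids with
  | nil => intro ls ps F _ _; simp
  | cons w wids' ih =>
    intro ls ps F h1 h2
    match ls, ps with
    | [], _ => simp at h1
    | _, [] => simp at h2
    | l :: ls', p :: ps' =>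
      simp only [List.length_cons, List.range_succ_eq_map, List.map_cons, List.map_map]
      simp only [List.getElem?_cons_zero, Option.getD_some, List.zip_cons_cons, List.map_cons]
      congr 1
      have := ih ls' ps' F (by simpa using h1) (by simpa using h2)
      rw [← this]
      simp [Function.comp]

-- ===== VERDICT (by name: the statement is the Claim_ definition above) =====
theorem correct_padding_spec : Claim_equal_correct_padding := by
  intro wids labels preds _ hpre
  obtain ⟨h1, h2, _⟩ := hpre
  show correct_padding wids labels preds = correct_padding_alt wids labels preds
  unfold correct_padding correct_padding_alt
  dsimp only
  rw [foldl_pair_append (fun i => (pvRowA ((PySem.List.pyGet? wids i).getD [])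
        ((PySem.List.pyGet? labels i).getD []) ((PySem.List.pyGet? preds i).getD [])).1)
      (fun i => (pvRowA ((PySem.List.pyGet? wids i).getD [])
        ((PySem.List.pyGet? labels i).getD []) ((PySem.List.pyGet? preds i).getD [])).2),
    foldl_pair_append (fun (t : List (Option Int) × (List Int × List Int)) => (pvRowWhileB t.1 t.2.1 t.2.2 0 [] []).1)
      (fun (t : List (Option Int) × (List Int × List Int)) => (pvRowWhileB t.1 t.2.1 t.2.2 0 [] []).2),
    PySem.List.pyRange_zero_natCast, List.map_map, List.map_map]
  rw [Prod.ext_iff]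
  constructor
  · simp only [List.nil_append, Function.comp_def, PySem.List.pyGet?_natCast]
    rw [map_range3 wids labels preds (fun ids ls ps => (pvRowA ids ls ps).1) h1 h2]
    simp [rowB_eq_rowA]
  · simp only [List.nil_append, Function.comp_def, PySem.List.pyGet?_natCast]
    rw [map_range3 wids labels preds (fun ids ls ps => (pvRowA ids ls ps).2) h1 h2]
    simp [rowB_eq_rowA]
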